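/- GENERATED by tools/from_farm_form.py from farm.toyh/worked/prog_main/Lemmas.lean (a worked proof of the farm's unit `prog_main`,
   accepted by the verdict) — do not edit. -/
import Toyh.Spec.Units.prog_main

/-!
  Lemmas for the unit `prog_main` of the heap toy (0x105000, 28 instructions; c/toyh/toyh.c:31–54): a CLIENT OF THE HEAP, proved
  from the contracts of `clamp_length`, `malloc`, `memcpy`, `free` alone.

  Part 1 (pure, no machine steps): a live range of the old heap does not overlap the next object; the footprint of `memcpy` into
  the new object keeps the heap's invariant.

  Part 2: the walk, cut into one lemma per returned callee state (Toyh/Spec/Proved/prog_main.lean chains them):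

      th_seg_entry_w   0x105000 → ret1          three pushes, `runs++`, `call clamp_length`
      th_seg_ret1_w    ret1 → ret2              `call malloc`           (under `HeapPre`)
      th_seg_ret2_w    ret2 → ret3 ∨ ret4       `if (p == NULL)`: NULL goes to ret4 with `ebx = 0`; otherwise `call memcpy` into the new object
      th_seg_ret3_w    ret3 → ret4              `call free`             (`p` is the start of a live object: `Heap.live_push`)
      th_seg_ret4_w    ret4 → after the `ret`   `mov rax, rbx`, three pops
-/

open X86 X86.User Asan ProgX.Base ProgX.Base.Spec Toyh.Spec

set_option maxRecDepth 4000
set_option maxHeartbeats 4000000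

namespace Toyh.Spec.Proved.prog_main
open Toyh.Spec.prog_main (Statement)

/-! ### Part 1: pure facts about the heap -/

/-- **A live range of the heap `H` does not overlap the object `malloc` hands out next.** The range lies in a live heap object
(below the next one: `HeapOK.next_above`), in one of the other live objects, or in a stack object (both outside the heap's region:
`HeapInv.restOut`, `HeapInv.stackObj_out`); the new object lies inside the region. What `memcpy(p, in, n)` asks about an overlap. -/
theorem th_live_apart_next_w {H : Heap} {rest : List Obj} {frames : List (Nat × FrameLayout)} {top : Nat} {mem : Mem} {a k c : Nat}
    (h : LiveIn (H.liveObjs ++ rest) frames a k) (hinv : HeapInv H rest frames top mem) (hfit : H.Fits c) :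
    a + k ≤ H.next ∨ H.next + c ≤ a := by
  obtain ⟨r1, r2, r3, r4, r5⟩ := hinv.heap.next_range hfit
  obtain ⟨o, ho, k1, k2⟩ := h
  rcases List.mem_append.mp ho with hs | hoth
  · -- a stack object
    rcases hinv.stackObj_out hs with hlo | hhi
    · left
      omega
    · right
      omega
  · rcases List.mem_append.mp hoth with hheap | hr
    · -- a live heap object
      obtain ⟨o', ho', _, e⟩ := Heap.mem_liveObjs.mp hheap
      have hab := hinv.heap.next_above ho'
      have hsc := hinv.heap.size_le_cap ho'
      have e1 : o.base = o'.base := by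
        rw [← e]
        rfl
      have e2 : o.size = o'.size := by
        rw [← e]
        rfl
      left
      omega
    · -- one of the other live objects
      rcases hinv.restOut o hr with hlo | hhi
      · left
        omega
      · right
        omega

/-- **`memcpy(p, in, n)` into the new object keeps the heap's invariant**: no shadow byte written; its footprint is the `n ≤ c` bytes
of the newest object `(H.next, n)` of `H.push n c` and 80 bytes of stack below `sp ≤ 800000H` (`HeapInv.sameExcept`). -/
theorem th_memcpy_keeps_w {H : Heap} {rest : List Obj} {frames : List (Nat × FrameLayout)} {top : Nat} {mem mem' : Mem} {n c sp : Nat}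
    (h : HeapInv (H.push n c) rest frames top mem) (hbase : H.base = 0x800000) (hun : ShadowUntouched mem mem')
    (hsp : sp ≤ 0x800000) (hnc : n ≤ c)
    (hs : Mem.SameExcept [⟨sp - 80, sp⟩, ⟨H.next, H.next + n⟩] mem mem') :
    HeapInv (H.push n c) rest frames top mem' := by
  have hbase' : (H.push n c).base = 0x800000 := hbase
  refine h.sameExcept hun hs ?_
  intro w hw
  rcases List.mem_cons.mp hw with rfl | hw
  · -- the stack window lies below the heap's region
    left
    left
    rw [hbase']
    exact hsp
  · -- the other window lies inside the newest object
    have e : w = ⟨H.next, H.next + n⟩ := List.mem_singleton.mp hw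
    subst e
    right
    refine ⟨⟨H.next, n, c, .live⟩, Heap.liveCap_push H n c, Nat.le_refl _, ?_⟩
    show H.next + n ≤ H.next + c
    omega

/-! ### The assertions at the cut points

  `u` is the state at the function's entry (RA = `u.reg .rsp`), `v` the state at the cut. -/

/-- **What holds at every cut point between the three pushes and the three pops**: the body's stack pointer `RA − 24`; `r13`, `r14`,
`r15` untouched; the three saved registers and the return address in their stack slots; the footprint so far (112 bytes of stack,
the heap's control cell, the new chunk's header, object and shadow, the global `runs`); the text, DF and the MXCSR masks. -/
structure ThBody_w (H : Heap) (u₀ u : State) (ret : Word) (v : State) : Prop where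
  /-- the body's stack pointer -/
  rsp : v.reg .rsp = u.reg .rsp - 24
  /-- never written by `prog_main` -/
  r13 : v.reg .r13 = u.reg .r13
  /-- never written by `prog_main` -/
  r14 : v.reg .r14 = u.reg .r14
  /-- never written by `prog_main` -/
  r15 : v.reg .r15 = u.reg .r15
  /-- `push r12` (0x105000) -/
  s12 : UInt64.ofNat (v.mem.readLE (u.reg .rsp - 8) 8) = u.reg .r12
  /-- `push rbp` (0x105002) -/
  sbp : UInt64.ofNat (v.mem.readLE (u.reg .rsp - 16) 8) = u.reg .rbp
  /-- `push rbx` (0x105003) -/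
  sbx : UInt64.ofNat (v.mem.readLE (u.reg .rsp - 24) 8) = u.reg .rbx
  /-- the return address -/
  sra : UInt64.ofNat (v.mem.readLE (u.reg .rsp) 8) = ret
  /-- the footprint of the contract, so far -/
  same : Mem.SameExcept [⟨(u.reg .rsp).toNat - 112, (u.reg .rsp).toNat⟩, ⟨0x800000, 0x800008⟩, ⟨H.next - 32, H.next - 8⟩,
    ⟨H.next, H.next + 64⟩, ⟨0xC00000 + H.next / 8, 0xC00000 + (H.next + 64 + 7) / 8⟩, ⟨0x141900, 0x141908⟩] u.mem v.mem
  /-- the image's text is that of the reference state -/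
  code : Mem.EqOn ProgX.Base.L.textLo ProgX.Base.L.textHi u₀.mem v.mem
  /-- DF = 0 -/
  df : v.flags .df = false
  /-- the SSE exceptions are masked -/
  mx : v.mxcsr &&& 0x1F80 = 0x1F80

/-- **At 0x105021 (ret1), `clamp_length(len)` has returned** (toyh.c:39): `r12 = in`, `rax = n ≤ 64`, `n ≤ len`; the heap is as at
the entry, its invariant holds with the clean stack ending at the body's stack pointer. -/
structure ThAtRet1_w (H : Heap) (rest : List Obj) (frames : List (Nat × FrameLayout)) (u₀ u : State) (ret : Word) (v : State) :
    Prop where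
  rip : v.rip = Toyh.L.prog_main.ret1
  body : ThBody_w H u₀ u ret v
  r12 : v.reg .r12 = u.reg .rdi
  n_le : (v.reg .rax).toNat ≤ 64
  n_len : (v.reg .rax).toNat ≤ (u.reg .rsi).toNat
  inv : HeapInv H rest frames ((u.reg .rsp).toNat - 24) v.mem

/-- **At 0x10502c (ret2), `malloc(n)` has returned** (toyh.c:40): `r12 = in`, `rbx = n`; BOTH outcomes of `malloc`'s contract, with
the clean stack ending at the body's stack pointer. -/
structure ThAtRet2_w (H : Heap) (rest : List Obj) (frames : List (Nat × FrameLayout)) (u₀ u : State) (ret : Word) (v : State) :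
    Prop where
  rip : v.rip = Toyh.L.prog_main.ret2
  body : ThBody_w H u₀ u ret v
  r12 : v.reg .r12 = u.reg .rdi
  n_le : (v.reg .rbx).toNat ≤ 64
  n_len : (v.reg .rbx).toNat ≤ (u.reg .rsi).toNat
  /-- room: the new object, live -/
  fits : H.Fits (r16 (v.reg .rbx).toNat) →
    (v.reg .rax).toNat = H.next ∧
    HeapInv (H.push (v.reg .rbx).toNat (r16 (v.reg .rbx).toNat)) rest frames ((u.reg .rsp).toNat - 24) v.mem
  /-- no room: NULL, the heap as it was -/
  nofit : ¬ H.Fits (r16 (v.reg .rbx).toNat) →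
    v.reg .rax = 0 ∧ HeapInv H rest frames ((u.reg .rsp).toNat - 24) v.mem

/-- **At 0x105042 (ret3), `memcpy(p, in, n)` has returned** (toyh.c:47): there was room; `rbp = p = H.next`, `rbx = n`; the heap has
the new live object. -/
structure ThAtRet3_w (H : Heap) (rest : List Obj) (frames : List (Nat × FrameLayout)) (u₀ u : State) (ret : Word) (v : State) :
    Prop where
  rip : v.rip = Toyh.L.prog_main.ret3
  body : ThBody_w H u₀ u ret v
  n_le : (v.reg .rbx).toNat ≤ 64
  n_len : (v.reg .rbx).toNat ≤ (u.reg .rsi).toNat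
  room : H.Fits (r16 (v.reg .rbx).toNat)
  rbp : (v.reg .rbp).toNat = H.next
  inv : HeapInv (H.push (v.reg .rbx).toNat (r16 (v.reg .rbx).toNat)) rest frames ((u.reg .rsp).toNat - 24) v.mem

/-- **The two outcomes of `prog_main`, for the requested size `n`**, about a result word `r` and a memory, with the clean stack
ending at `top`: what `ProgMainPost` says, and what holds at ret4 with `r = rbx`. -/
def ThOutcome_w (H : Heap) (rest : List Obj) (frames : List (Nat × FrameLayout)) (len top : Nat) (r : Word) (mem : Mem) : Prop :=
  ∃ n, n ≤ 64 ∧ n ≤ len ∧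
    (H.Fits (r16 n) → r.toNat = n ∧ HeapInv ((H.push n (r16 n)).release H.next) rest frames top mem) ∧
    (¬ H.Fits (r16 n) → r = 0 ∧ HeapInv H rest frames top mem)

/-- **At 0x10504a (ret4), `free(p)` has returned, or `malloc` had returned NULL** (toyh.c:49, 42): `rbx` is the result; the heap is
as `prog_main` leaves it. -/
structure ThAtRet4_w (H : Heap) (rest : List Obj) (frames : List (Nat × FrameLayout)) (u₀ u : State) (ret : Word) (v : State) :
    Prop where
  rip : v.rip = Toyh.L.prog_main.ret4
  body : ThBody_w H u₀ u ret v
  out : ThOutcome_w H rest frames (u.reg .rsi).toNat ((u.reg .rsp).toNat - 24) (v.reg .rbx) v.mem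

/-! ### Part 2: the walk -/

/-- **0x105000 … 0x10501c, `call clamp_length`, 0x105021 (ret1)** (toyh.c:31–39): three pushes, `r12 = in`, `rdi = len`, the unchecked
load and store of the global `runs` (141900H), the call: afterwards `rax = n ≤ 64`, `n ≤ len`. No store went to the shadow or into the
heap's region, so the heap's invariant holds as at the entry. -/
theorem th_seg_entry_w (Lay : Layout) (hLay : Lay.hi = 0x1000000) (μ : Microarch) (hμ : UserX.MicroOK μ) (u₀ : State)
    (hcode : HasCodeNat Lay u₀ Toyh.L.prog_main.entry Toyh.Code.code_prog_main.nat Toyh.L.prog_main.size)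
    (H : Heap) (rest : List Obj) (frames : List (Nat × FrameLayout)) (u : State) (ret : Word)
    (h_clamp_length : Calls Lay μ ProgX.Base.WayInv (ProgX.Base.conv u₀) Toyh.L.clamp_length.entry
      (Toyh.Spec.clamp_length.spec (H.liveObjs ++ rest) frames))
    (he : AtEntry (ProgX.Base.conv u₀) Toyh.L.prog_main.entry (prog_main.spec H rest frames).frame ret u)
    (hpre : (prog_main.spec H rest frames).pre u) :
    ReachVia Lay μ ProgX.Base.WayInv u (ThAtRet1_w H rest frames u₀ u ret) := by
  v_entry he
  obtain ⟨hp, hlen, hin⟩ := hpre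
  have hbase := hp.base
  have hlimit := hp.limit
  have hsp := hp.inv.shadow.stack
  u_walk hcode [hμ.vendor] until [Toyh.L.prog_main.ret1] span [ProgX.Base.L.textLo, ProgX.Base.L.textHi] side (v_side)
  case call_inv =>
    v_inv
  case pre_10501c =>
    -- clamp_length's precondition: the shadow clause of the heap's precondition, under the lower stack pointer
    have hun : ShadowUntouched u.mem s_10501c.mem := by v_untouched
    refine hp.shadowPre.callee hun ?_ ?_ ?_
    · rw [w_rsp]
      u_omega
    · rw [w_rsp]
      u_omega
    · rw [w_rsp]
      u_omega
  -- 0x105021 (ret1): clamp_length has returned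
  have hun0 : ShadowUntouched u.mem s_10501c.mem := by
    rw [w_mem_10501c]
    v_untouched
  v_after_call w_rsp_10501c w_mem_10501c
  obtain ⟨hn64, hnlen, hunc⟩ := w_post
  rw [w_rdi_10501c] at hnlen
  -- the stack slots: through the callee's footprint (its own frame: nothing)
  have hp12 : UInt64.ofNat (s_10501c.mem.readLE (u.reg .rsp - 8) 8) = u.reg .r12 := by u_resolve
  rw [w_mem_10501c] at hp12
  have hs12 : UInt64.ofNat (s_10501cr.mem.readLE (u.reg .rsp - 8) 8) = u.reg .r12 := by u_frame hp12
  have hpbp : UInt64.ofNat (s_10501c.mem.readLE (u.reg .rsp - 16) 8) = u.reg .rbp := by u_resolve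
  rw [w_mem_10501c] at hpbp
  have hsbp : UInt64.ofNat (s_10501cr.mem.readLE (u.reg .rsp - 16) 8) = u.reg .rbp := by u_frame hpbp
  have hpbx : UInt64.ofNat (s_10501c.mem.readLE (u.reg .rsp - 24) 8) = u.reg .rbx := by u_resolve
  rw [w_mem_10501c] at hpbx
  have hsbx : UInt64.ofNat (s_10501cr.mem.readLE (u.reg .rsp - 24) 8) = u.reg .rbx := by u_frame hpbx
  have hpra : UInt64.ofNat (s_10501c.mem.readLE (u.reg .rsp) 8) = ret := by u_resolve
  rw [w_mem_10501c] at hpra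
  have hsra : UInt64.ofNat (s_10501cr.mem.readLE (u.reg .rsp) 8) = ret := by u_frame hpra
  -- the heap's region and the shadow are as at the entry
  have hsame : Mem.EqOn H.base H.limit u.mem s_10501cr.mem := by
    rw [hbase, hlimit]
    u_eqon
  have hun : ShadowUntouched u.mem s_10501cr.mem := hun0.trans hunc
  have hinv : HeapInv H rest frames ((u.reg .rsp).toNat - 24) s_10501cr.mem :=
    (hp.inv.eqOn hun hsame).lower (by omega) (by omega) (by omega)
  refine ReachVia.done ⟨w_rip, ⟨w_rsp, ?_, ?_, ?_, hs12, hsbp, hsbx, hsra, ?_, w_eq, w_df, w_mx⟩, w_r12, hn64, hnlen (by omega), hinv⟩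
  · exact w_kept.get .r13 rfl
  · exact w_kept.get .r14 rfl
  · exact w_kept.get .r15 rfl
  · u_same

/-- **0x105021 … 0x105027, `call malloc`, 0x10502c (ret2)** (toyh.c:40 `p = malloc(n)`): `rbx = rdi = n`; `malloc`'s precondition is
the heap's common precondition under the lower stack pointer (the push of the return address is a store outside the heap's region
and outside the shadow); its post, both outcomes, restated at the body's stack pointer. -/
theorem th_seg_ret1_w (Lay : Layout) (hLay : Lay.hi = 0x1000000) (μ : Microarch) (hμ : UserX.MicroOK μ) (u₀ : State)
    (hcode : HasCodeNat Lay u₀ Toyh.L.prog_main.entry Toyh.Code.code_prog_main.nat Toyh.L.prog_main.size)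
    (H : Heap) (rest : List Obj) (frames : List (Nat × FrameLayout)) (u : State) (ret : Word)
    (h_malloc : Calls Lay μ ProgX.Base.WayInv (ProgX.Base.conv u₀) ProgX.Base.L.malloc.entry
      (ProgX.Base.Spec.malloc.spec H rest frames))
    (he : AtEntry (ProgX.Base.conv u₀) Toyh.L.prog_main.entry (prog_main.spec H rest frames).frame ret u)
    (hpre : (prog_main.spec H rest frames).pre u) (v : State)
    (hat : ThAtRet1_w H rest frames u₀ u ret v) :
    ReachVia Lay μ ProgX.Base.WayInv v (ThAtRet2_w H rest frames u₀ u ret) := by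
  v_entry he
  obtain ⟨hp, hlen, hin⟩ := hpre
  obtain ⟨w_rip, hbody, c_r12, hn64, hnlen, hinv⟩ := hat
  have hbase := hp.base
  have hlimit := hp.limit
  have hroom := hinv.heap.room
  rw [hbase, hlimit] at hroom
  -- where the next object is: above the stack, below the shadow
  have hnx : 0x800040 ≤ H.next ∧ H.next ≤ 0xC00020 := by
    rw [Heap.next_def, hbase]
    omega
  -- the state at the cut, under the names the walker reads; `rax = n` as a variable
  obtain ⟨n, c_rax⟩ : ∃ n, v.reg .rax = n := ⟨_, rfl⟩
  rw [c_rax] at hn64 hnlen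
  have c_rsp : v.reg .rsp = u.reg .rsp - 24 := hbody.rsp
  have w_kept : RegsKept [.rsp] v v := RegsKept.refl _ _
  have w_eq : Mem.EqOn ProgX.Base.L.textLo ProgX.Base.L.textHi u₀.mem v.mem := hbody.code
  have hdf : v.flags .df = false := hbody.df
  have hmx : v.mxcsr &&& 0x1F80 = 0x1F80 := hbody.mx
  have hsse : SseOK v := ProgX.Base.sseOK_of_abiInv ⟨hdf, hmx⟩
  have k_r12 : UInt64.ofNat (v.mem.readLE (u.reg .rsp - 8) 8) = u.reg .r12 := hbody.s12
  have k_rbp : UInt64.ofNat (v.mem.readLE (u.reg .rsp - 16) 8) = u.reg .rbp := hbody.sbp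
  have k_rbx : UInt64.ofNat (v.mem.readLE (u.reg .rsp - 24) 8) = u.reg .rbx := hbody.sbx
  have k_ra : UInt64.ofNat (v.mem.readLE (u.reg .rsp) 8) = ret := hbody.sra
  have hsame : Mem.SameExcept [⟨(u.reg .rsp).toNat - 112, (u.reg .rsp).toNat⟩, ⟨0x800000, 0x800008⟩, ⟨H.next - 32, H.next - 8⟩,
      ⟨H.next, H.next + 64⟩, ⟨0xC00000 + H.next / 8, 0xC00000 + (H.next + 64 + 7) / 8⟩, ⟨0x141900, 0x141908⟩] u.mem v.mem :=
    hbody.same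
  u_walk hcode [hμ.vendor] until [Toyh.L.prog_main.ret2] span [ProgX.Base.L.textLo, ProgX.Base.L.textHi] side (v_side)
  case call_inv =>
    v_inv
  case pre_105027 =>
    -- malloc's precondition: the heap's invariant over the pushed return address, at the callee's `rsp + 8` = the body's stack pointer
    have e_rsp : (s_105027.reg .rsp).toNat + 8 = (u.reg .rsp).toNat - 24 := by
      rw [w_rsp]
      u_omega
    refine ⟨?_, hbase, hlimit, hp.text, hp.offText⟩
    rw [e_rsp, w_mem]
    exact hinv.writeLE_out _ _ _ (by u_omega) (by rw [hbase]; left; u_omega) (by left; u_omega)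
  -- 0x10502c (ret2): malloc has returned
  have hpost : AllocPost H rest frames 32 (s_105027.reg .rdi).toNat (r16 (s_105027.reg .rdi).toNat) s_105027 s_105027r :=
    w_post
  rw [w_rdi_105027] at hpost
  clear w_post
  have e8 : (s_105027.reg .rsp).toNat + 8 = (u.reg .rsp).toNat - 24 := by
    rw [w_rsp_105027]
    u_omega
  v_after_call w_rsp_105027 w_mem_105027
  simp only [shadowSpan, w_rdi_105027] at w_same
  refine ReachVia.done ⟨w_rip, ⟨w_rsp, ?_, ?_, ?_, ?_, ?_, ?_, ?_, ?_, w_eq, w_df, w_mx⟩, ?_, ?_, ?_, ?_, ?_⟩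
  · exact (w_kept.get .r13 rfl).trans hbody.r13
  · exact (w_kept.get .r14 rfl).trans hbody.r14
  · exact (w_kept.get .r15 rfl).trans hbody.r15
  · u_frame k_r12
  · u_frame k_rbp
  · u_frame k_rbx
  · u_frame k_ra
  · u_same
  · exact (w_kept.get .r12 rfl).trans c_r12
  · rw [w_rbx]
    exact hn64
  · rw [w_rbx]
    exact hnlen
  · -- room: the new object
    rw [w_rbx]
    intro hfit
    obtain ⟨k1, k2⟩ := hpost.1 hfit
    rw [e8] at k2
    exact ⟨k1, k2⟩
  · -- no room: NULL
    rw [w_rbx]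
    intro hnf
    obtain ⟨k1, k2, _, _⟩ := hpost.2 hnf
    rw [e8] at k2
    exact ⟨k1, k2⟩

/-- **0x10502c … 0x10503d, `call memcpy`, 0x105042 (ret3); or 0x105052 … 0x10504a (ret4)** (toyh.c:41–47). `if (p == NULL)`: without room
`malloc` returned 0, `ebx = 0` and the function goes to its epilogue (ret4) with the heap as it was. With room `p = H.next ≠ 0`:
`rbp = rdi = p`, `rdx = n`, `rsi = in`; `memcpy`'s precondition: the shadow clause for the heap WITH the new object; the source is
live as before (`LiveIn.heap_push`), the destination is the new live object (`Heap.live_push`), no overlap (`th_live_apart_next_w`).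
Its footprint — the `n` bytes of the new object, 80 bytes of stack — keeps the heap's invariant (`HeapInv.sameExcept`). -/
theorem th_seg_ret2_w (Lay : Layout) (hLay : Lay.hi = 0x1000000) (μ : Microarch) (hμ : UserX.MicroOK μ) (u₀ : State)
    (hcode : HasCodeNat Lay u₀ Toyh.L.prog_main.entry Toyh.Code.code_prog_main.nat Toyh.L.prog_main.size)
    (H : Heap) (rest : List Obj) (frames : List (Nat × FrameLayout)) (u : State) (ret : Word)
    (h_memcpy : ∀ (others : List Obj) (frames : List (Nat × FrameLayout)),
      Calls Lay μ ProgX.Base.WayInv (ProgX.Base.conv u₀) ProgX.Base.L.memcpy.entry (ProgX.Base.Spec.memcpy.spec others frames))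
    (he : AtEntry (ProgX.Base.conv u₀) Toyh.L.prog_main.entry (prog_main.spec H rest frames).frame ret u)
    (hpre : (prog_main.spec H rest frames).pre u) (v : State)
    (hat : ThAtRet2_w H rest frames u₀ u ret v) :
    ReachVia Lay μ ProgX.Base.WayInv v (fun w =>
      ThAtRet3_w H rest frames u₀ u ret w ∨ ThAtRet4_w H rest frames u₀ u ret w) := by
  v_entry he
  obtain ⟨hp, hlen, hin⟩ := hpre
  obtain ⟨w_rip, hbody, c_r12, hn64, hnlen, hfits, hnofit⟩ := hat
  have hbase := hp.base
  have hlimit := hp.limit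
  have hroom := hp.inv.heap.room
  rw [hbase, hlimit] at hroom
  -- where the next object is: above the stack, below the shadow
  have hnx : 0x800040 ≤ H.next ∧ H.next ≤ 0xC00020 := by
    rw [Heap.next_def, hbase]
    omega
  -- the state at the cut, under the names the walker reads; `rbx = n`, `rax = p` as variables
  obtain ⟨n, c_rbx⟩ : ∃ n, v.reg .rbx = n := ⟨_, rfl⟩
  rw [c_rbx] at hn64 hnlen hfits hnofit
  obtain ⟨p, c_rax⟩ : ∃ p, v.reg .rax = p := ⟨_, rfl⟩
  rw [c_rax] at hfits hnofit
  have c_rsp : v.reg .rsp = u.reg .rsp - 24 := hbody.rsp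
  have w_kept : RegsKept [.rsp] v v := RegsKept.refl _ _
  have w_eq : Mem.EqOn ProgX.Base.L.textLo ProgX.Base.L.textHi u₀.mem v.mem := hbody.code
  have hdf : v.flags .df = false := hbody.df
  have hmx : v.mxcsr &&& 0x1F80 = 0x1F80 := hbody.mx
  have hsse : SseOK v := ProgX.Base.sseOK_of_abiInv ⟨hdf, hmx⟩
  have k_r12 : UInt64.ofNat (v.mem.readLE (u.reg .rsp - 8) 8) = u.reg .r12 := hbody.s12
  have k_rbp : UInt64.ofNat (v.mem.readLE (u.reg .rsp - 16) 8) = u.reg .rbp := hbody.sbp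
  have k_rbx : UInt64.ofNat (v.mem.readLE (u.reg .rsp - 24) 8) = u.reg .rbx := hbody.sbx
  have k_ra : UInt64.ofNat (v.mem.readLE (u.reg .rsp) 8) = ret := hbody.sra
  have hsame : Mem.SameExcept [⟨(u.reg .rsp).toNat - 112, (u.reg .rsp).toNat⟩, ⟨0x800000, 0x800008⟩, ⟨H.next - 32, H.next - 8⟩,
      ⟨H.next, H.next + 64⟩, ⟨0xC00000 + H.next / 8, 0xC00000 + (H.next + 64 + 7) / 8⟩, ⟨0x141900, 0x141908⟩] u.mem v.mem :=
    hbody.same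
  by_cases hfit : H.Fits (r16 n.toNat)
  · -- ROOM: `p = H.next`, the new object is live
    obtain ⟨hpn, hinv⟩ := hfits hfit
    clear hfits hnofit
    have hcpy := h_memcpy ((H.push n.toNat (r16 n.toNat)).liveObjs ++ rest) frames
    have hbase' : (H.push n.toNat (r16 n.toNat)).base = 0x800000 := hbase
    have hlimit' : (H.push n.toNat (r16 n.toNat)).limit = 0xC00000 := hlimit
    -- 0x10502c … 0x10503d: `test rax, rax ; je` (not taken: `p = H.next ≠ 0`), the three arguments, the call
    u_walk hcode [hμ.vendor] until [Toyh.L.prog_main.ret3, Toyh.L.prog_main.ret4] span [ProgX.Base.L.textLo, ProgX.Base.L.textHi] side (v_side)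
    case call_inv =>
      v_inv
    case pre_10503d =>
      -- memcpy's precondition, over the heap WITH the new object
      have e_rsp : (s_10503d.reg .rsp).toNat + 8 = (u.reg .rsp).toNat - 24 := by
        rw [w_rsp]
        u_omega
      have hinv' : HeapInv (H.push n.toNat (r16 n.toNat)) rest frames ((s_10503d.reg .rsp).toNat + 8) s_10503d.mem := by
        rw [e_rsp, w_mem]
        exact hinv.writeLE_out _ _ _ (by u_omega) (by rw [hbase']; left; u_omega) (by left; u_omega)
      have hp' : HeapPre (H.push n.toNat (r16 n.toNat)) rest frames s_10503d :=
        ⟨hinv', hbase', hlimit', hp.text, hp.offText⟩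
      refine ⟨hp'.shadowPre, ?_⟩
      rw [w_rdx, w_rsi, w_rdi]
      rcases hin with h0 | hlive
      · -- an empty input: nothing is copied
        left
        omega
      · right
        have hsub : LiveIn (H.liveObjs ++ rest) frames (u.reg .rdi).toNat n.toNat :=
          hlive.sub _ _ (Nat.le_refl _) (by omega)
        refine ⟨hsub.heap_push _ _, ?_, ?_⟩
        · -- the destination is the new live object
          rw [hpn]
          exact (Heap.live_push H n.toNat (r16 n.toNat)).liveIn rest frames (Nat.le_refl _) (Nat.le_refl _)
        · -- no overlap: the source was live before the allocation
          have hap := th_live_apart_next_w hsub hp.inv hfit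
          rw [hpn]
          omega
    -- 0x105042 (ret3): memcpy has returned
    have hunc : ShadowUntouched s_10503d.mem s_10503dr.mem := w_post.2.1
    clear w_post
    rw [w_mem_10503d] at hunc
    v_after_call w_rsp_10503d w_mem_10503d
    simp only [w_rdi_10503d, w_rdx_10503d, hpn] at w_same
    -- the heap's invariant: over the pushed return address, then over memcpy's footprint
    have hinv1 : HeapInv (H.push n.toNat (r16 n.toNat)) rest frames ((u.reg .rsp).toNat - 24)
        (v.mem.writeLE (u.reg .rsp - 32) 8 1069122) :=
      hinv.writeLE_out _ _ _ (by u_omega) (by rw [hbase']; left; u_omega) (by left; u_omega)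
    have hinv2 : HeapInv (H.push n.toNat (r16 n.toNat)) rest frames ((u.reg .rsp).toNat - 24) s_10503dr.mem :=
      th_memcpy_keeps_w hinv1 hbase hunc (by u_omega) (le_r16 _) w_same
    refine ReachVia.done (Or.inl ⟨w_rip, ⟨w_rsp, ?_, ?_, ?_, ?_, ?_, ?_, ?_, ?_, w_eq, w_df, w_mx⟩, ?_, ?_, ?_, ?_, ?_⟩)
    · exact (w_kept.get .r13 rfl).trans hbody.r13
    · exact (w_kept.get .r14 rfl).trans hbody.r14
    · exact (w_kept.get .r15 rfl).trans hbody.r15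
    · u_frame k_r12
    · u_frame k_rbp
    · u_frame k_rbx
    · u_frame k_ra
    · u_same
    · rw [(w_kept.get .rbx rfl).trans c_rbx]
      exact hn64
    · rw [(w_kept.get .rbx rfl).trans c_rbx]
      exact hnlen
    · rw [(w_kept.get .rbx rfl).trans c_rbx]
      exact hfit
    · rw [w_rbp]
      exact hpn
    · rw [(w_kept.get .rbx rfl).trans c_rbx]
      exact hinv2
  · -- NO ROOM: `p = 0`, `je` taken: `mov ebx, 0 ; jmp` to the epilogue (toyh.c:42 `return 0`)
    obtain ⟨hp0, hinv⟩ := hnofit hfit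
    clear hfits hnofit
    rw [hp0] at c_rax
    u_walk hcode [hμ.vendor] until [Toyh.L.prog_main.ret3, Toyh.L.prog_main.ret4] span [ProgX.Base.L.textLo, ProgX.Base.L.textHi] side (v_side)
    have hdf' : s_105057.flags .df = false := by
      rw [w_flags]
      simp only [X86.User.df_setStatus]
      exact hdf
    have hmx' : s_105057.mxcsr &&& 0x1F80 = 0x1F80 := by
      rw [w_mxcsr]
      exact hmx
    refine ReachVia.done (Or.inr ⟨w_rip, ⟨w_rsp, ?_, ?_, ?_, ?_, ?_, ?_, ?_, ?_, w_eq, hdf', hmx'⟩, ?_⟩)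
    · exact (w_kept.get .r13 rfl).trans hbody.r13
    · exact (w_kept.get .r14 rfl).trans hbody.r14
    · exact (w_kept.get .r15 rfl).trans hbody.r15
    · rw [w_mem]
      exact k_r12
    · rw [w_mem]
      exact k_rbp
    · rw [w_mem]
      exact k_rbx
    · rw [w_mem]
      exact k_ra
    · rw [w_mem]
      exact hsame
    · -- the outcome: no room for `n`, the result is 0, the heap as it was
      refine ⟨n.toNat, hn64, hnlen, fun h => absurd h hfit, fun _ => ⟨?_, ?_⟩⟩
      · rw [w_rbx]
        rfl
      · rw [w_mem]
        exact hinv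

/-- **0x105042 … 0x105045, `call free`, 0x10504a (ret4)** (toyh.c:49 `free(p)`): `rdi = rbp = p = H.next`, the start of the live object
`(H.next, n)` of the heap with the new object (`Heap.live_push`); `free`'s precondition is the heap's common precondition over the
pushed return address. Afterwards the heap is `(H.push n (r16 n)).release H.next`. -/
theorem th_seg_ret3_w (Lay : Layout) (hLay : Lay.hi = 0x1000000) (μ : Microarch) (hμ : UserX.MicroOK μ) (u₀ : State)
    (hcode : HasCodeNat Lay u₀ Toyh.L.prog_main.entry Toyh.Code.code_prog_main.nat Toyh.L.prog_main.size)
    (H : Heap) (rest : List Obj) (frames : List (Nat × FrameLayout)) (u : State) (ret : Word)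
    (h_free : ∀ (H : Heap) (rest : List Obj) (frames : List (Nat × FrameLayout)) (n : Nat),
      Calls Lay μ ProgX.Base.WayInv (ProgX.Base.conv u₀) ProgX.Base.L.free.entry (ProgX.Base.Spec.free.spec H rest frames n))
    (he : AtEntry (ProgX.Base.conv u₀) Toyh.L.prog_main.entry (prog_main.spec H rest frames).frame ret u)
    (hpre : (prog_main.spec H rest frames).pre u) (v : State)
    (hat : ThAtRet3_w H rest frames u₀ u ret v) :
    ReachVia Lay μ ProgX.Base.WayInv v (ThAtRet4_w H rest frames u₀ u ret) := by
  v_entry he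
  obtain ⟨hp, hlen, hin⟩ := hpre
  obtain ⟨w_rip, hbody, hn64, hnlen, hfit, hpn, hinv⟩ := hat
  have hbase := hp.base
  have hlimit := hp.limit
  have hroom := hp.inv.heap.room
  rw [hbase, hlimit] at hroom
  -- where the object is: above the stack, below the shadow
  have hnx : 0x800040 ≤ H.next ∧ H.next ≤ 0xC00020 := by
    rw [Heap.next_def, hbase]
    omega
  -- the state at the cut, under the names the walker reads; `rbx = n`, `rbp = p` as variables
  obtain ⟨n, c_rbx⟩ : ∃ n, v.reg .rbx = n := ⟨_, rfl⟩
  rw [c_rbx] at hn64 hnlen hfit hinv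
  obtain ⟨p, c_rbp⟩ : ∃ p, v.reg .rbp = p := ⟨_, rfl⟩
  rw [c_rbp] at hpn
  have c_rsp : v.reg .rsp = u.reg .rsp - 24 := hbody.rsp
  have w_kept : RegsKept [.rsp] v v := RegsKept.refl _ _
  have w_eq : Mem.EqOn ProgX.Base.L.textLo ProgX.Base.L.textHi u₀.mem v.mem := hbody.code
  have hdf : v.flags .df = false := hbody.df
  have hmx : v.mxcsr &&& 0x1F80 = 0x1F80 := hbody.mx
  have hsse : SseOK v := ProgX.Base.sseOK_of_abiInv ⟨hdf, hmx⟩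
  have k_r12 : UInt64.ofNat (v.mem.readLE (u.reg .rsp - 8) 8) = u.reg .r12 := hbody.s12
  have k_rbp : UInt64.ofNat (v.mem.readLE (u.reg .rsp - 16) 8) = u.reg .rbp := hbody.sbp
  have k_rbx : UInt64.ofNat (v.mem.readLE (u.reg .rsp - 24) 8) = u.reg .rbx := hbody.sbx
  have k_ra : UInt64.ofNat (v.mem.readLE (u.reg .rsp) 8) = ret := hbody.sra
  have hsame : Mem.SameExcept [⟨(u.reg .rsp).toNat - 112, (u.reg .rsp).toNat⟩, ⟨0x800000, 0x800008⟩, ⟨H.next - 32, H.next - 8⟩,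
      ⟨H.next, H.next + 64⟩, ⟨0xC00000 + H.next / 8, 0xC00000 + (H.next + 64 + 7) / 8⟩, ⟨0x141900, 0x141908⟩] u.mem v.mem :=
    hbody.same
  have hbase' : (H.push n.toNat (r16 n.toNat)).base = 0x800000 := hbase
  have hlimit' : (H.push n.toNat (r16 n.toNat)).limit = 0xC00000 := hlimit
  -- `p` is the start of the live object `(H.next, n)`
  have hlive : (H.push n.toNat (r16 n.toNat)).Live p.toNat n.toNat := by
    rw [hpn]
    exact Heap.live_push H n.toNat (r16 n.toNat)
  have hfree := h_free (H.push n.toNat (r16 n.toNat)) rest frames n.toNat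
  u_walk hcode [hμ.vendor] until [Toyh.L.prog_main.ret4] span [ProgX.Base.L.textLo, ProgX.Base.L.textHi] side (v_side)
  case call_inv =>
    v_inv
  case pre_105045 =>
    -- free's precondition: the heap's invariant over the pushed return address; `p` is the start of a live object
    have e_rsp : (s_105045.reg .rsp).toNat + 8 = (u.reg .rsp).toNat - 24 := by
      rw [w_rsp]
      u_omega
    refine ⟨⟨?_, hbase', hlimit', hp.text, hp.offText⟩, Or.inr ?_⟩
    · rw [e_rsp, w_mem]
      exact hinv.writeLE_out _ _ _ (by u_omega) (by rw [hbase']; left; u_omega) (by left; u_omega)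
    · rw [w_rdi]
      exact hlive
  -- 0x10504a (ret4): free has returned
  have hne : (s_105045.reg .rdi).toNat ≠ 0 := by
    rw [w_rdi_105045]
    omega
  have k3 := w_post.2 hne
  rw [w_rdi_105045, hpn] at k3
  clear w_post
  have e8 : (s_105045.reg .rsp).toNat + 8 = (u.reg .rsp).toNat - 24 := by
    rw [w_rsp_105045]
    u_omega
  rw [e8] at k3
  v_after_call w_rsp_105045 w_mem_105045
  simp only [shadowSpan, w_rdi_105045, hpn] at w_same
  refine ReachVia.done ⟨w_rip, ⟨w_rsp, ?_, ?_, ?_, ?_, ?_, ?_, ?_, ?_, w_eq, w_df, w_mx⟩, ?_⟩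
  · exact (w_kept.get .r13 rfl).trans hbody.r13
  · exact (w_kept.get .r14 rfl).trans hbody.r14
  · exact (w_kept.get .r15 rfl).trans hbody.r15
  · u_frame k_r12
  · u_frame k_rbp
  · u_frame k_rbx
  · u_frame k_ra
  · u_same
  · -- the outcome: there was room for `n`, the result is `n`, the new object is freed
    rw [(w_kept.get .rbx rfl).trans c_rbx]
    exact ⟨n.toNat, hn64, hnlen, fun _ => ⟨rfl, k3⟩, fun h => absurd hfit h⟩

/-- **0x10504a … 0x105051: the epilogue** (toyh.c:50 / 42): `mov rax, rbx`, the three pops, the `ret`. The outcome at ret4, restated for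
`rax` and with the clean stack ending at `RA + 8` (`HeapPre.raise_back`: every protected frame of a caller lies at or above it). -/
theorem th_seg_ret4_w (Lay : Layout) (hLay : Lay.hi = 0x1000000) (μ : Microarch) (hμ : UserX.MicroOK μ) (u₀ : State)
    (hcode : HasCodeNat Lay u₀ Toyh.L.prog_main.entry Toyh.Code.code_prog_main.nat Toyh.L.prog_main.size)
    (H : Heap) (rest : List Obj) (frames : List (Nat × FrameLayout)) (u : State) (ret : Word)
    (he : AtEntry (ProgX.Base.conv u₀) Toyh.L.prog_main.entry (prog_main.spec H rest frames).frame ret u)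
    (hpre : (prog_main.spec H rest frames).pre u) (v : State)
    (hat : ThAtRet4_w H rest frames u₀ u ret v) :
    ReachVia Lay μ ProgX.Base.WayInv v (Returned (ProgX.Base.conv u₀) (prog_main.spec H rest frames) u ret) := by
  v_entry he
  obtain ⟨hp, hlen, hin⟩ := hpre
  obtain ⟨w_rip, hbody, hout⟩ := hat
  -- the state at the cut, under the names the walker reads; `rbx = r` as a variable
  obtain ⟨r, c_rbx⟩ : ∃ r, v.reg .rbx = r := ⟨_, rfl⟩
  rw [c_rbx] at hout
  have c_rsp : v.reg .rsp = u.reg .rsp - 24 := hbody.rsp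
  have c_r13 : v.reg .r13 = u.reg .r13 := hbody.r13
  have c_r14 : v.reg .r14 = u.reg .r14 := hbody.r14
  have c_r15 : v.reg .r15 = u.reg .r15 := hbody.r15
  have w_kept : RegsKept [.rsp] v v := RegsKept.refl _ _
  have w_eq : Mem.EqOn ProgX.Base.L.textLo ProgX.Base.L.textHi u₀.mem v.mem := hbody.code
  have hdf : v.flags .df = false := hbody.df
  have hmx : v.mxcsr &&& 0x1F80 = 0x1F80 := hbody.mx
  have hsse : SseOK v := ProgX.Base.sseOK_of_abiInv ⟨hdf, hmx⟩
  have k_r12 : UInt64.ofNat (v.mem.readLE (u.reg .rsp - 8) 8) = u.reg .r12 := hbody.s12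
  have k_rbp : UInt64.ofNat (v.mem.readLE (u.reg .rsp - 16) 8) = u.reg .rbp := hbody.sbp
  have k_rbx : UInt64.ofNat (v.mem.readLE (u.reg .rsp - 24) 8) = u.reg .rbx := hbody.sbx
  have k_ra : UInt64.ofNat (v.mem.readLE (u.reg .rsp) 8) = ret := hbody.sra
  have hsame : Mem.SameExcept [⟨(u.reg .rsp).toNat - 112, (u.reg .rsp).toNat⟩, ⟨0x800000, 0x800008⟩, ⟨H.next - 32, H.next - 8⟩,
      ⟨H.next, H.next + 64⟩, ⟨0xC00000 + H.next / 8, 0xC00000 + (H.next + 64 + 7) / 8⟩, ⟨0x141900, 0x141908⟩] u.mem v.mem :=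
    hbody.same
  u_walk hcode [hμ.vendor] span [ProgX.Base.L.textLo, ProgX.Base.L.textHi] side (v_side)
  -- 0x105051: the `ret` has been executed
  refine ReachVia.done ?_
  refine X86.User.Returned.mk w_rip w_rsp ?_ ?_ (ProgX.Base.conv_code_in w_eq) ?_ ?_
  · -- saved: rbx, rbp, r12 popped back; r13, r14, r15 never written
    intro r hr
    cases r <;> first
      | exact absurd hr (by decide)
      | (with_reducible assumption)
      | exact (w_kept _ rfl).trans hbody.r13
      | exact (w_kept _ rfl).trans hbody.r14
      | exact (w_kept _ rfl).trans hbody.r15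
  · -- same: nothing was written since ret4
    simp only [X86.User.Spec.footprint, vspec, shadowSpan]
    rw [w_mem]
    exact hsame
  · -- inv
    v_inv
  · -- the postcondition: the outcome at ret4, for `rax`, with the clean stack ending at `RA + 8`
    obtain ⟨n, h64, hl, h1, h2⟩ := hout
    refine ⟨n, h64, hl, fun hf => ?_, fun hnf => ?_⟩
    · obtain ⟨k1, k2⟩ := h1 hf
      rw [w_rax, w_mem]
      exact ⟨k1, hp.raise_back k2 (by omega)⟩
    · obtain ⟨k1, k2⟩ := h2 hnf
      rw [w_rax, w_mem]
      exact ⟨k1, hp.raise_back k2 (by omega)⟩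

end Toyh.Spec.Proved.prog_main
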